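-- pv_equiv track=rewrite | github.com/Kushagraw12/Competitive-Programming | DAP/c1/w2/2_last_digit_of_fibonacci_number/fibonacci_last_digit.py | solve
-- ===== SOURCE A (Python) =====
-- def solve(n):
--         n1 = 0
--         n2 = 1
--         a = []
--         for i in range(n - 1):
--                 a.append(n1 + n2)
--                 n1, n2 = n2, n1 + n2
--         if len(a) != 0:
--                 return (max(a) % 10)
--         else:
--                 return 0
-- ===== SOURCE B (Python) =====
-- # Pisano period: Fibonacci last digits repeat with period 60, so look the answer
-- # up in a precomputed 60-entry table instead of iterating n times.
-- _PISANO = [0, 1, 1, 2, 3, 5, 8, 3, 1, 4, 5, 9, 4, 3, 7, 0, 7, 7, 4, 1,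
--            5, 6, 1, 7, 8, 5, 3, 8, 1, 9, 0, 9, 9, 8, 7, 5, 2, 7, 9, 6,
--            5, 1, 6, 7, 3, 0, 3, 3, 6, 9, 5, 4, 9, 3, 2, 5, 7, 2, 9, 1]
--
-- def solve(n):
--     if n <= 0:
--         return 0
--     return _PISANO[n % 60]
-- ===== Notes on version B (the rewrite author's own statement) =====
-- stated objective: faster
-- what changed: Replaces the O(n) big-integer Fibonacci loop (which builds the whole list and takes its max) with an O(1) lookup into the precomputed 60-entry Pisano table of Fibonacci last digits mod 10.
-- intended difference: At n = 1 A returns 0 because its loop body never runs and it falls into the empty-list branch, while B returns 1 = the last digit of fib(1), which is the intended value for this task. — e.g. on solve(1): A returns 0, B returns 1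
import Mathlib
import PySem

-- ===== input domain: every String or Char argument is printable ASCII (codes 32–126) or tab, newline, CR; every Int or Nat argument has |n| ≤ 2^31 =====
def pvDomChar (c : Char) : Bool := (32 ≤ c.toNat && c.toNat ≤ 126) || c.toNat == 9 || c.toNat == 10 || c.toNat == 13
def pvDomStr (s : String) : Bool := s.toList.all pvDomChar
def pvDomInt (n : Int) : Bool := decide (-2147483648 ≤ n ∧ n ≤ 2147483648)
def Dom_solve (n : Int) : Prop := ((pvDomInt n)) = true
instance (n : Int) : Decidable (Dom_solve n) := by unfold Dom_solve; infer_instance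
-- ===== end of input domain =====

-- B replaces A's O(n) Fibonacci loop by an O(1) lookup in the 60-entry Pisano table of last digits.

-- ===== PORT A =====
def solve (n : Int) : Int :=
  let st : Int × Int × List Int :=
    (PySem.List.pyRange 0 (n - 1) 1).foldl
      (fun s _ => (s.2.1, s.1 + s.2.1, s.2.2 ++ [s.1 + s.2.1]))
      (0, 1, [])
  if st.2.2.length ≠ 0 then
    -- max(a) on a list guarded nonempty: max? is some here, getD's default is unreachable
    PySem.Int.mod ((PySem.List.max? st.2.2 (fun x => x)).getD 0) 10
  else 0

-- ===== PORT B =====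
def pisanoTable : List Int :=
  [0, 1, 1, 2, 3, 5, 8, 3, 1, 4, 5, 9, 4, 3, 7, 0, 7, 7, 4, 1,
   5, 6, 1, 7, 8, 5, 3, 8, 1, 9, 0, 9, 9, 8, 7, 5, 2, 7, 9, 6,
   5, 1, 6, 7, 3, 0, 3, 3, 6, 9, 5, 4, 9, 3, 2, 5, 7, 2, 9, 1]

def solve_alt (n : Int) : Int :=
  if n ≤ 0 then 0
  else
    -- _PISANO[n % 60]: the index is always in [0, 60), so pyGet? is some; getD's default is unreachable
    (PySem.List.pyGet? pisanoTable (PySem.Int.mod n 60)).getD 0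

-- ===== PRECONDITION & SPEC =====
-- At n = 1 A returns 0 (its loop never runs and it falls into the empty-list branch) while B
-- returns 1 = the last digit of fib(1), the intended value for this task.
def D_solve (n : Int) : Prop := n = 1
instance (n : Int) : Decidable (D_solve n) := by unfold D_solve; infer_instance

def Spec_solve (n : Int) (out : Int) : Prop := ¬ D_solve n → out = solve_alt n
instance (n : Int) (out : Int) : Decidable (Spec_solve n out) := by unfold Spec_solve; infer_instance

def pvDiffWitness_solve : Int := 1
def pvDiffWitnessOut_solve : Int × Int := (0, 1)

-- ===== CLAIM (what is proved, stated in full; the proofs are below) =====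
def Claim_unchanged_solve : Prop := ∀ (n : Int), Dom_solve n → Spec_solve n (solve n)
def Claim_changed_solve : Prop := Dom_solve (pvDiffWitness_solve) ∧ D_solve (pvDiffWitness_solve) ∧ solve (pvDiffWitness_solve) = pvDiffWitnessOut_solve.1 ∧ solve_alt (pvDiffWitness_solve) = pvDiffWitnessOut_solve.2 ∧ pvDiffWitnessOut_solve.1 ≠ pvDiffWitnessOut_solve.2
def Claim_exact_solve : Prop := ∀ (n : Int), Dom_solve n → D_solve n → solve n ≠ solve_alt n

-- ===== LEMMAS AND PROOFS =====

-- A's loop after k iterations: the Fibonacci pair and the list fib(2), …, fib(k+1).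
lemma loop_inv (k : Nat) :
    (List.range k).foldl
      (fun (s : Int × Int × List Int) _ => (s.2.1, s.1 + s.2.1, s.2.2 ++ [s.1 + s.2.1]))
      (0, 1, []) =
    ((Nat.fib k : Int), (Nat.fib (k+1) : Int),
      (List.range k).map (fun i => ((Nat.fib (i+2) : Nat) : Int))) := by
  induction k with
  | zero => simp
  | succ k ih =>
      rw [List.range_succ, List.foldl_append, ih, List.map_append]
      have e : k + 1 + 1 = k + 2 := rfl
      have hf : (Nat.fib k : Int) + (Nat.fib (k + 1) : Int) = ((Nat.fib (k + 2) : Nat) : Int) := by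
        rw [Nat.fib_add_two]; push_cast; ring
      simp only [List.foldl_cons, List.foldl_nil, List.map_cons, List.map_nil, e, hf]

-- pisanoTable holds the last digits of the first 60 Fibonacci numbers.
lemma table_fib : ∀ r : Fin 60,
    (PySem.List.pyGet? pisanoTable ((r : Nat) : Int)).getD 0 = ((Nat.fib r % 10 : Nat) : Int) := by
  decide

lemma fib_mod10_pair : ∀ k, Nat.fib (k + 60) % 10 = Nat.fib k % 10 ∧
    Nat.fib (k + 61) % 10 = Nat.fib (k + 1) % 10 := by
  intro k
  induction k with
  | zero => decide
  | succ k ih =>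
      obtain ⟨h1, h2⟩ := ih
      have hA : Nat.fib (k + 60 + 2) = Nat.fib (k + 60) + Nat.fib (k + 60 + 1) := Nat.fib_add_two
      have hB : Nat.fib (k + 2) = Nat.fib k + Nat.fib (k + 1) := Nat.fib_add_two
      have h2' : Nat.fib (k + 60 + 1) % 10 = Nat.fib (k + 1) % 10 := by
        have e : k + 60 + 1 = k + 61 := by omega
        rw [e]; exact h2
      constructor
      · have e : k + 1 + 60 = k + 61 := by omega
        rw [e]; exact h2
      · have e : k + 1 + 61 = k + 60 + 2 := by omega
        have e2 : k + 1 + 1 = k + 2 := by omega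
        rw [e, e2, hA, hB]
        omega

lemma fib_mod10_period : ∀ k, Nat.fib k % 10 = Nat.fib (k % 60) % 10 := by
  intro k
  induction k using Nat.strong_induction_on with
  | _ k ih =>
      by_cases h : k < 60
      · rw [Nat.mod_eq_of_lt h]
      · have h60 : 60 ≤ k := by omega
        calc Nat.fib k % 10 = Nat.fib ((k - 60) + 60) % 10 := by rw [Nat.sub_add_cancel h60]
          _ = Nat.fib (k - 60) % 10 := (fib_mod10_pair (k - 60)).1
          _ = Nat.fib ((k - 60) % 60) % 10 := ih (k - 60) (by omega)
          _ = Nat.fib (k % 60) % 10 := by rw [show (k - 60) % 60 = k % 60 by omega]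

-- ===== VERDICT (by name: the statement is the Claim_ definition above) =====
-- A on n ≥ 2 computes the last digit of fib(n)
lemma solve_of_two_le (m : Nat) (hm : 2 ≤ m) :
    solve (m : Int) = ((Nat.fib m % 10 : Nat) : Int) := by
  unfold solve
  have hcast : ((m : Int) - 1 - 0).toNat = m - 1 := by omega
  rw [PySem.List.pyRange_one, hcast, List.foldl_map]
  rw [loop_inv (m - 1)]
  simp only []
  set k := m - 1 with hk
  have hk1 : 1 ≤ k := by omega
  have hne : (List.range k).map (fun i => ((Nat.fib (i + 2) : Nat) : Int)) ≠ [] := by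
    simp [List.range_eq_nil]; omega
  have hlen : ((List.range k).map (fun i => ((Nat.fib (i + 2) : Nat) : Int))).length ≠ 0 := by
    simpa using by omega
  have hmem : ((Nat.fib (k + 1) : Nat) : Int) ∈
      (List.range k).map (fun i => ((Nat.fib (i + 2) : Nat) : Int)) := by
    refine List.mem_map.mpr ⟨k - 1, List.mem_range.mpr (by omega), ?_⟩
    rw [show k - 1 + 2 = k + 1 by omega]
  have hmax : PySem.List.max? ((List.range k).map (fun i => ((Nat.fib (i + 2) : Nat) : Int)))
      (fun x => x) = some ((Nat.fib (k + 1) : Nat) : Int) := by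
    cases h : PySem.List.max? ((List.range k).map (fun i => ((Nat.fib (i + 2) : Nat) : Int)))
        (fun x => x) with
    | none => exact absurd ((PySem.List.max?_eq_none_iff _ _).mp h) hne
    | some x =>
        have hx : x ∈ (List.range k).map (fun i => ((Nat.fib (i + 2) : Nat) : Int)) :=
          PySem.List.max?_mem h
        obtain ⟨i, hi, rfl⟩ := List.mem_map.mp hx
        have hik : i < k := List.mem_range.mp hi
        have hle1 : Nat.fib (i + 2) ≤ Nat.fib (k + 1) := Nat.fib_mono (by omega)
        have hle2 : ((Nat.fib (k + 1) : Nat) : Int) ≤ ((Nat.fib (i + 2) : Nat) : Int) :=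
          PySem.List.max?_isMax h _ hmem
        congr 1
        exact le_antisymm (by exact_mod_cast hle1) (by exact_mod_cast hle2)
  rw [if_pos hlen, hmax]
  rw [show k + 1 = m by omega]
  simp only [Option.getD_some]
  rw [PySem.Int.mod_eq_emod_of_pos (by omega)]
  push_cast
  rfl

theorem solve_spec : Claim_unchanged_solve := by
  intro n _ hD
  unfold D_solve at hD
  by_cases hle : n ≤ 0
  · have hr : PySem.List.pyRange 0 (n - 1) 1 = [] := PySem.List.pyRange_one_eq_nil (by omega)
    simp [solve, hr, solve_alt, hle]
  · obtain ⟨m, rfl⟩ : ∃ m : Nat, n = (m : Int) := ⟨n.toNat, by omega⟩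
    have hm : 2 ≤ m := by omega
    rw [solve_of_two_le m hm]
    unfold solve_alt
    rw [if_neg hle]
    have hmod : PySem.Int.mod (m : Int) 60 = ((m % 60 : Nat) : Int) := by
      exact_mod_cast PySem.Int.mod_natCast m 60
    rw [hmod]
    have := table_fib ⟨m % 60, Nat.mod_lt m (by omega)⟩
    simp only at this
    rw [this]
    rw [fib_mod10_period m]

theorem solve_changed : Claim_changed_solve := by unfold Claim_changed_solve; decide

theorem solve_tight : Claim_exact_solve := by
  intro n _ hD
  unfold D_solve at hD
  subst hD
  decide
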